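-- pv_equiv track=rewrite | github.com/owilkins2/Comps_Final | Code/Bubbles/simulation.py | get_extrapolative_component
-- ===== SOURCE A (Python) =====
-- normal_increase = 1
--
-- initial_fundamental_value = 100
--
-- def get_extrapolative_component(price_history):
--     expected_change = 0
--     index = 1 # one represents current period
--     while index <= 10:
--         if len(price_history) > index + 1: # an entry does exist
--             expected_change += price_history[len(price_history) - index]
--         else: # an entry does not exist
--             expected_change += (initial_fundamental_value - ((len(price_history) - index) * normal_increase))
--         index += 1
--
--     return expected_change
-- ===== SOURCE B (Python) =====
-- def get_extrapolative_component(price_history):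
--     n = len(price_history)
--     m = max(0, min(10, n - 2))
--     tail = sum(price_history[n - m:])
--     return tail + (10 - m) * (100 - n) + (55 - m * (m + 1) // 2)
-- ===== Notes on version B (the rewrite author's own statement) =====
-- stated objective: simpler
-- what changed: The 10-iteration while loop is replaced by computing the boundary m = max(0, min(10, len-2)), one slice-sum of the last m prices, and a closed-form arithmetic-series formula for the extrapolated indices m+1..10.
import Mathlib
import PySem

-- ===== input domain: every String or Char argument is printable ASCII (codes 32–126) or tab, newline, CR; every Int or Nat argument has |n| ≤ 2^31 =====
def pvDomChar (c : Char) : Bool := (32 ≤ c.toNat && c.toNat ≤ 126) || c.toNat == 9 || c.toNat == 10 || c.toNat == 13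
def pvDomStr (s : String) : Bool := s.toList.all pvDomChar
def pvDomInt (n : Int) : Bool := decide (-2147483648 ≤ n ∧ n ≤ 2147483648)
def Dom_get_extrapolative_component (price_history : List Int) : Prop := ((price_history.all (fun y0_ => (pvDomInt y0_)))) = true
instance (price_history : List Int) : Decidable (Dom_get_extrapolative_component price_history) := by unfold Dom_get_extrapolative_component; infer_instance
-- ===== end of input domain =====

-- B replaces A's 10-step while loop by a boundary computation: one slice-sum of the last
-- min(10, len-2) prices plus a closed-form arithmetic-series formula for the extrapolated part
-- (objective: simpler — constant-size loop gone, no asymptotic speed claim).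

-- ===== PORT A =====
-- while index <= 10 with index starting at 1 = a fold over range(1, 11)
def get_extrapolative_component (price_history : List Int) : Int :=
  (PySem.List.pyRange 1 11 1).foldl
    (fun expected_change index =>
      if ((price_history.length : Int)) > index + 1 then
        expected_change + PySem.List.pyGetD price_history ((price_history.length : Int) - index) 0
      else
        expected_change + (100 - ((price_history.length : Int) - index) * 1)) 0

-- ===== PORT B =====
def get_extrapolative_component_alt (price_history : List Int) : Int :=
  let n : Int := (price_history.length : Int)
  let m : Int := max 0 (min 10 (n - 2))
  let tail : Int := (PySem.List.slice price_history (some (n - m)) none).sum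
  tail + (10 - m) * (100 - n) + (55 - PySem.Int.floordiv (m * (m + 1)) 2)

-- ===== PRECONDITION & SPEC =====
def Spec_get_extrapolative_component (price_history : List Int) (out : Int) : Prop := out = get_extrapolative_component_alt price_history
instance (price_history : List Int) (out : Int) : Decidable (Spec_get_extrapolative_component price_history out) := by unfold Spec_get_extrapolative_component; infer_instance

-- ===== CLAIM (what is proved, stated in full; the proofs are below) =====
def Claim_equal_get_extrapolative_component : Prop := ∀ (price_history : List Int), Dom_get_extrapolative_component price_history → Spec_get_extrapolative_component price_history (get_extrapolative_component price_history)

-- ===== LEMMAS AND PROOFS =====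

theorem pyRange_one_eleven : PySem.List.pyRange 1 11 1 = [1,2,3,4,5,6,7,8,9,10] := by decide

theorem exists_ten {α : Type} (l : List α) (h : l.length = 10) :
    ∃ t1 t2 t3 t4 t5 t6 t7 t8 t9 t10, l = [t1,t2,t3,t4,t5,t6,t7,t8,t9,t10] := by
  rcases l with _|⟨a1,_|⟨a2,_|⟨a3,_|⟨a4,_|⟨a5,_|⟨a6,_|⟨a7,_|⟨a8,_|⟨a9,_|⟨a10,rest⟩⟩⟩⟩⟩⟩⟩⟩⟩⟩ <;>
    simp_all

-- the split form: history = front ++ last ten prices, front at least 2 long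
theorem key_big_split (f : List Int) (t1 t2 t3 t4 t5 t6 t7 t8 t9 t10 : Int) (hf : 2 ≤ f.length) :
    get_extrapolative_component (f ++ [t1,t2,t3,t4,t5,t6,t7,t8,t9,t10]) =
      get_extrapolative_component_alt (f ++ [t1,t2,t3,t4,t5,t6,t7,t8,t9,t10]) := by
  set ts : List Int := [t1,t2,t3,t4,t5,t6,t7,t8,t9,t10] with hts
  have hlen : (f ++ ts).length = f.length + 10 := by simp [hts]
  have hbody : ∀ (acc : Int), ∀ i ∈ PySem.List.pyRange 1 11 1,
      (if (((f ++ ts).length : Int)) > i + 1 then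
        acc + PySem.List.pyGetD (f ++ ts) (((f ++ ts).length : Int) - i) 0
      else
        acc + (100 - (((f ++ ts).length : Int) - i) * 1))
      = acc + ts.getD (10 - i.toNat) 0 := by
    intro acc i hi
    rw [PySem.List.mem_pyRange_one] at hi
    rw [hlen, if_pos (by omega)]
    rw [PySem.List.pyGetD_eq_getElem _ _ (by omega) (by rw [hlen]; omega)]
    have h2 : (((f.length + 10 : Nat) : Int) - i).toNat = f.length + (10 - i.toNat) := by omega
    simp only [h2]
    rw [List.getElem_append_right (by omega)]
    have h3 : f.length + (10 - i.toNat) - f.length = 10 - i.toNat := by omega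
    simp only [h3]
    rw [List.getD_eq_getElem ts 0 (by simp [hts]; omega)]
  unfold get_extrapolative_component
  rw [PySem.List.foldl_congr_mem _ _ (fun acc i => acc + ts.getD (10 - i.toNat) 0) _ hbody]
  simp only [get_extrapolative_component_alt]
  have h2 : (2:Int) ≤ (f.length : Int) := by exact_mod_cast hf
  have hm : max 0 (min 10 (((f ++ ts).length : Int) - 2)) = 10 := by rw [hlen]; push_cast; omega
  rw [hm]
  have hsl : ((f ++ ts).length : Int) - 10 = ((f.length : Nat) : Int) := by rw [hlen]; push_cast; ring
  rw [hsl, PySem.List.slice_from_natCast, List.drop_left]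
  rw [pyRange_one_eleven]
  simp [hts, List.foldl, List.getD, PySem.Int.floordiv]
  ring

theorem key_big (ph : List Int) (h : 12 ≤ ph.length) :
    get_extrapolative_component ph = get_extrapolative_component_alt ph := by
  obtain ⟨t1,t2,t3,t4,t5,t6,t7,t8,t9,t10,hd⟩ :=
    exists_ten (ph.drop (ph.length - 10)) (by simp; omega)
  have hph : ph = ph.take (ph.length - 10) ++ [t1,t2,t3,t4,t5,t6,t7,t8,t9,t10] := by
    rw [← hd, List.take_append_drop]
  rw [hph]
  exact key_big_split _ _ _ _ _ _ _ _ _ _ _ (by simp; omega)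

theorem key (ph : List Int) :
    get_extrapolative_component ph = get_extrapolative_component_alt ph := by
  rcases ph with _|⟨a1,_|⟨a2,_|⟨a3,_|⟨a4,_|⟨a5,_|⟨a6,_|⟨a7,_|⟨a8,_|⟨a9,_|⟨a10,_|⟨a11,_|⟨a12,rest⟩⟩⟩⟩⟩⟩⟩⟩⟩⟩⟩⟩
  case cons.cons.cons.cons.cons.cons.cons.cons.cons.cons.cons.cons =>
    exact key_big _ (by simp)
  all_goals
    simp [get_extrapolative_component, get_extrapolative_component_alt, pyRange_one_eleven,
      PySem.List.pyGetD, PySem.List.pyGet?, PySem.List.pyIdx?, PySem.List.slice,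
      PySem.List.clampIdx, PySem.Int.floordiv]
  all_goals ring

-- ===== VERDICT (by name: the statement is the Claim_ definition above) =====
theorem get_extrapolative_component_spec : Claim_equal_get_extrapolative_component := by
  intro ph _
  unfold Spec_get_extrapolative_component
  exact key ph
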